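-- pv_equiv track=rewrite | github.com/murli4612/MyNotes | CompanyAskedQuestions/Interview/Cargill/test5.py | highest_Frequency
-- ===== SOURCE A (Python) =====
-- def highest_Frequency(s):
--     char_map = {}  # Dictionary to store max consecutive occurrences per character
--     max_frequency = 0
--     current_frequency = 1
--
--     for i in range(1, len(s)):
--         if s[i] == s[i - 1]:
--             current_frequency += 1
--         else:
--             # Update the character's max frequency in the dictionary
--             char_map[s[i - 1]] = max(char_map.get(s[i - 1], 0), current_frequency)
--
--             # Update overall max frequency
--             max_frequency = max(max_frequency, char_map[s[i - 1]])
--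
--             current_frequency = 1  # Reset for new character
--
--     # Handle the last sequence
--     char_map[s[-1]] = max(char_map.get(s[-1], 0), current_frequency)
--     max_frequency = max(max_frequency, char_map[s[-1]])
--
--     # Find all characters with the max frequency
--     result_chars = [char for char, freq in char_map.items() if freq == max_frequency]
--
--     return max_frequency, result_chars
-- ===== SOURCE B (Python) =====
-- def highest_Frequency(s):
--     # Phase 1: split s into maximal runs of equal characters.
--     runs = []
--     i, n = 0, len(s)
--     while i < n:
--         j = i + 1
--         while j < n and s[j] == s[i]:
--             j += 1
--         runs.append((s[i], j - i))
--         i = j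
--     # Phase 2: aggregate runs: best run length per char, and the overall best.
--     char_map = {}
--     max_frequency = 0
--     for ch, ln in runs:
--         if ln > char_map.get(ch, 0):
--             char_map[ch] = ln
--         if ln > max_frequency:
--             max_frequency = ln
--     result_chars = [ch for ch, f in char_map.items() if f == max_frequency]
--     return max_frequency, result_chars
-- ===== Notes on version B (the rewrite author's own statement) =====
-- stated objective: alternative
-- what changed: B first splits the string into maximal runs of equal characters (two-pointer scan) and then aggregates the run list into the per-character best and the overall maximum, instead of A's single index loop over range(1,len(s)) that interleaves run counting, dict updates and max tracking and needs a separate post-loop step for the last run.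
import Mathlib
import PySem

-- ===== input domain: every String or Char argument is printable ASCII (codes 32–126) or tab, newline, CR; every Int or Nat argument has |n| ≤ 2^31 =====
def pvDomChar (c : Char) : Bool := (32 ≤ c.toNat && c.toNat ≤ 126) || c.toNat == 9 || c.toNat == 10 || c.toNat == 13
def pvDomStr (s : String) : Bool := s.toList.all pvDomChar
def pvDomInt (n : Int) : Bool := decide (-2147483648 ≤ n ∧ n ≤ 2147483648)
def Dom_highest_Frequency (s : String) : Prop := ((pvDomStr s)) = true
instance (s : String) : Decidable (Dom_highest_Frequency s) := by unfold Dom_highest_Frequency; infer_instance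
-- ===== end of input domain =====

-- B splits the string into maximal runs first and then aggregates the run list (alternative
-- decomposition, same cost); equivalence is about the return value; A raises IndexError on "".

-- ===== PORT A =====
-- literal port of A: index loop over range(1, len(s)) comparing s[i] with s[i-1],
-- then the post-loop update at s[-1] (reachable only for nonempty s; Pre_ excludes "")
def highest_Frequency (s : String) : Int × List String :=
  let cs := s.toList
  let st := (PySem.List.pyRange 1 (cs.length) 1).foldl
    (fun (st : PySem.Dict Char Int × Int × Int) i =>
      if PySem.List.pyGetD cs i ' ' == PySem.List.pyGetD cs (i - 1) ' ' then
        (st.1, st.2.1, st.2.2 + 1)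
      else
        (st.1.insert (PySem.List.pyGetD cs (i - 1) ' ')
           (max (st.1.getD (PySem.List.pyGetD cs (i - 1) ' ') 0) st.2.2),
         max st.2.1 (max (st.1.getD (PySem.List.pyGetD cs (i - 1) ' ') 0) st.2.2), 1))
    (PySem.Dict.empty, 0, 1)
  let lastc := PySem.List.pyGetD cs (-1) ' '
  let v := max (st.1.getD lastc 0) st.2.2
  let cm := st.1.insert lastc v
  let mx := max st.2.1 v
  (mx, cm.items.filterMap (fun p => if p.2 = mx then some (String.singleton p.1) else none))

-- ===== PORT B =====
-- Source B phase 1, the nested two-pointer scan: a maximal run is the char plus the takeWhile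
-- prefix of equal chars, the outer loop resumes at the dropWhile rest (fuel = length, for
-- structural recursion only; it is never exhausted)
def pvRunsF : Nat → List Char → List (Char × Int)
  | _, [] => []
  | 0, _ :: _ => []
  | fuel + 1, c :: rest =>
    (c, 1 + ((rest.takeWhile (· == c)).length : Int)) :: pvRunsF fuel (rest.dropWhile (· == c))

def pvRuns (l : List Char) : List (Char × Int) := pvRunsF l.length l

def highest_Frequency_alt (s : String) : Int × List String :=
  let st := (pvRuns s.toList).foldl
    (fun (st : PySem.Dict Char Int × Int) p =>
      (if p.2 > st.1.getD p.1 0 then st.1.insert p.1 p.2 else st.1,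
       if p.2 > st.2 then p.2 else st.2))
    (PySem.Dict.empty, 0)
  (st.2, st.1.items.filterMap (fun p => if p.2 = st.2 then some (String.singleton p.1) else none))

-- ===== PRECONDITION & SPEC =====
-- Pre_ excludes only the empty string, on which A raises IndexError at s[-1]
def Pre_highest_Frequency (s : String) : Prop := s ≠ ""
instance (s : String) : Decidable (Pre_highest_Frequency s) := by unfold Pre_highest_Frequency; infer_instance
def pvWitness_highest_Frequency : String := "aab"

def Spec_highest_Frequency (s : String) (out : Int × List String) : Prop := out = highest_Frequency_alt s
instance (s : String) (out : Int × List String) : Decidable (Spec_highest_Frequency s out) := by unfold Spec_highest_Frequency; infer_instance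

-- ===== CLAIM (what is proved, stated in full; the proofs are below) =====
def Claim_equal_highest_Frequency : Prop := ∀ (s : String), Dom_highest_Frequency s → Pre_highest_Frequency s → Spec_highest_Frequency s (highest_Frequency s)

-- ===== LEMMAS AND PROOFS =====

-- A's loop body as a function of the pair (s[i], s[i-1])
def pvStep (st : PySem.Dict Char Int × Int × Int) (p : Char × Char) : PySem.Dict Char Int × Int × Int :=
  if p.1 == p.2 then
    (st.1, st.2.1, st.2.2 + 1)
  else
    (st.1.insert p.2 (max (st.1.getD p.2 0) st.2.2),
     max st.2.1 (max (st.1.getD p.2 0) st.2.2), 1)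

-- A's loop, structurally: state (char_map, max_frequency, current_frequency), previous char, rest
def pvLoopA : PySem.Dict Char Int → Int → Int → Char → List Char → PySem.Dict Char Int × Int × Int
  | cm, mx, cur, _, [] => (cm, mx, cur)
  | cm, mx, cur, prev, c :: rest =>
    if c == prev then pvLoopA cm mx (cur + 1) c rest
    else pvLoopA (cm.insert prev (max (cm.getD prev 0) cur))
           (max mx (max (cm.getD prev 0) cur)) 1 c rest

-- A's post-loop update at the last character
def pvFinA (st : PySem.Dict Char Int × Int × Int) (lastc : Char) : PySem.Dict Char Int × Int :=
  (st.1.insert lastc (max (st.1.getD lastc 0) st.2.2),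
   max st.2.1 (max (st.1.getD lastc 0) st.2.2))

-- B's aggregation loop over the run list
def pvLoopB (st : PySem.Dict Char Int × Int) (runs : List (Char × Int)) : PySem.Dict Char Int × Int :=
  runs.foldl
    (fun (st : PySem.Dict Char Int × Int) p =>
      (if p.2 > st.1.getD p.1 0 then st.1.insert p.1 p.2 else st.1,
       if p.2 > st.2 then p.2 else st.2)) st

lemma pvLoopB_nil (st : PySem.Dict Char Int × Int) : pvLoopB st [] = st := rfl

lemma pvLoopB_cons (cm : PySem.Dict Char Int) (mx : Int) (k : Char) (v : Int)
    (runs : List (Char × Int)) :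
    pvLoopB (cm, mx) ((k, v) :: runs)
      = pvLoopB (if v > cm.getD k 0 then cm.insert k v else cm, if v > mx then v else mx) runs := rfl

lemma pvRunsF_eq : ∀ (f1 f2 : Nat) (l : List Char), l.length ≤ f1 → l.length ≤ f2 →
    pvRunsF f1 l = pvRunsF f2 l := by
  intro f1
  induction f1 with
  | zero =>
    intro f2 l h1 _
    have hl : l = [] := by cases l with | nil => rfl | cons a t => simp at h1
    subst hl; cases f2 <;> rfl
  | succ n ih =>
    intro f2 l h1 h2
    cases l with
    | nil => cases f2 <;> rfl
    | cons c rest =>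
      cases f2 with
      | zero => simp at h2
      | succ m =>
        simp only [pvRunsF]
        congr 1
        have hd := List.length_dropWhile_le (· == c) rest
        simp only [List.length_cons] at h1 h2
        exact ih _ _ (by omega) (by omega)

lemma pvRuns_cons (c : Char) (rest : List Char) :
    pvRuns (c :: rest)
      = (c, 1 + ((rest.takeWhile (· == c)).length : Int)) :: pvRuns (rest.dropWhile (· == c)) := by
  simp only [pvRuns, List.length_cons, pvRunsF]
  congr 1
  exact pvRunsF_eq _ _ _ (List.length_dropWhile_le _ _) le_rfl

lemma pv_zip_eq (cs : List Char) :
    (PySem.List.pyRange 1 (cs.length) 1).map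
      (fun i => (PySem.List.pyGetD cs i ' ', PySem.List.pyGetD cs (i - 1) ' '))
    = cs.tail.zip cs := by
  apply List.ext_getElem
  · simp [PySem.List.length_pyRange_one]
  · intro k h1 h2
    have hk : k < cs.length - 1 := by
      simp [List.length_zip, List.length_tail] at h2
      omega
    simp only [List.getElem_map, PySem.List.getElem_pyRange_one, List.getElem_zip,
      List.getElem_tail]
    have e2 : (1 : Int) + (k : Int) - 1 = ((k : Nat) : Int) := by omega
    have e3 : (1 : Int) + (k : Int) = (((k + 1 : Nat)) : Int) := by push_cast; ring
    rw [e2, e3, PySem.List.pyGetD_natCast, PySem.List.pyGetD_natCast, Prod.mk.injEq]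
    constructor
    · rw [List.getD_eq_getElem?_getD, List.getElem?_eq_getElem (by omega)]
      rfl
    · rw [List.getD_eq_getElem?_getD, List.getElem?_eq_getElem (by omega)]
      rfl

lemma pv_fold_zip (rest : List Char) : ∀ (c : Char) (cm : PySem.Dict Char Int) (mx cur : Int),
    (rest.zip (c :: rest)).foldl pvStep (cm, mx, cur) = pvLoopA cm mx cur c rest := by
  induction rest with
  | nil => intro c cm mx cur; simp [pvLoopA]
  | cons r rs ih =>
    intro c cm mx cur
    rw [List.zip_cons_cons, List.foldl_cons]
    by_cases h : r = c
    · subst h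
      rw [show pvStep (cm, mx, cur) (r, r) = (cm, mx, cur + 1) from by simp [pvStep]]
      rw [show pvLoopA cm mx cur r (r :: rs) = pvLoopA cm mx (cur + 1) r rs from by
        simp [pvLoopA]]
      exact ih r cm mx (cur + 1)
    · have hb : (r == c) = false := beq_eq_false_iff_ne.mpr h
      rw [show pvStep (cm, mx, cur) (r, c)
          = (cm.insert c (max (cm.getD c 0) cur), max mx (max (cm.getD c 0) cur), 1) from by
        simp [pvStep, hb]]
      rw [show pvLoopA cm mx cur c (r :: rs)
          = pvLoopA (cm.insert c (max (cm.getD c 0) cur)) (max mx (max (cm.getD c 0) cur)) 1 r rs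
        from by simp [pvLoopA, hb]]
      exact ih r _ _ _

-- re-inserting a key with its current value leaves the dict unchanged
lemma pv_insert_eq_of_get? {d : PySem.Dict Char Int} {k : Char} {v : Int}
    (hnd : d.keys.Nodup) (hv : d.get? k = some v) : d.insert k v = d := by
  have hc : d.contains k = true := by
    rw [PySem.Dict.contains_eq_isSome_get?, hv]; rfl
  apply PySem.Dict.ext
  rw [PySem.Dict.items_insert_of_contains _ _ hc]
  have hmap : ∀ p ∈ d.items, (if p.1 == k then (k, v) else p) = p := by
    intro p hp
    obtain ⟨k1, v1⟩ := p
    by_cases h : (k1 == k) = true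
    · have hk : k1 = k := eq_of_beq h
      have hget : d.get? k1 = some v1 := PySem.Dict.get?_of_mem_items d hp hnd
      rw [hk] at hget
      have h2 : v1 = v := Option.some.inj (hget.symm.trans hv)
      calc (if (k1, v1).1 == k then (k, v) else (k1, v1)) = (k, v) := if_pos h
        _ = (k1, v1) := by rw [hk, h2]
    · exact if_neg h
  rw [List.map_congr_left hmap, List.map_id']

-- A's run-end update equals B's conditional update, given every stored value is ≤ mx
lemma pv_step_eq (cm : PySem.Dict Char Int) (mx L : Int) (c : Char) (hL : 1 ≤ L)
    (hinv : ∀ k, cm.getD k 0 ≤ mx) (hnd : cm.keys.Nodup) :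
    ((cm.insert c (max (cm.getD c 0) L), max mx (max (cm.getD c 0) L)) :
        PySem.Dict Char Int × Int)
      = (if L > cm.getD c 0 then cm.insert c L else cm, if L > mx then L else mx) := by
  by_cases h : cm.getD c 0 < L
  · rw [if_pos h]
    rw [max_eq_right h.le, Prod.mk.injEq]
    exact ⟨rfl, by omega⟩
  · rw [if_neg h]
    have hle : L ≤ cm.getD c 0 := not_lt.mp h
    have hmax : max (cm.getD c 0) L = cm.getD c 0 := max_eq_left hle
    have hmx := hinv c
    cases hq : cm.get? c with
    | none =>
      have h0 : cm.getD c 0 = 0 := by rw [PySem.Dict.getD_eq_get?_getD, hq]; rfl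
      exfalso; omega
    | some w =>
      have h0 : cm.getD c 0 = w := by rw [PySem.Dict.getD_eq_get?_getD, hq]; rfl
      rw [hmax, Prod.mk.injEq]
      refine ⟨?_, by omega⟩
      rw [h0]
      exact pv_insert_eq_of_get? hnd hq

-- walking a block of characters equal to the previous char only increments current_frequency
lemma pv_loopA_run : ∀ (pre : List Char) (c : Char), (∀ x ∈ pre, x = c) →
    ∀ (rest : List Char) (cm : PySem.Dict Char Int) (mx cur : Int),
    pvLoopA cm mx cur c (pre ++ rest) = pvLoopA cm mx (cur + (pre.length : Int)) c rest := by
  intro pre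
  induction pre with
  | nil => intro c _ rest cm mx cur; simp
  | cons x xs ih =>
    intro c hall rest cm mx cur
    have hx : x = c := hall x (by simp)
    subst hx
    rw [List.cons_append,
      show pvLoopA cm mx cur x (x :: (xs ++ rest)) = pvLoopA cm mx (cur + 1) x (xs ++ rest)
        from by simp [pvLoopA],
      ih x (fun y hy => hall y (by simp [hy])) rest cm mx (cur + 1)]
    congr 1
    simp only [List.length_cons]
    push_cast
    ring

lemma pv_getLastD_all : ∀ (l : List Char) (c d : Char), (∀ x ∈ l, x = c) →
    (c :: l).getLastD d = c := by
  intro l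
  induction l with
  | nil => intro c d _; rfl
  | cons x xs ih =>
    intro c d hall
    have hx : x = c := hall x (by simp)
    subst hx
    rw [List.getLastD_cons]
    exact ih x x (fun y hy => hall y (by simp [hy]))

lemma pv_getLastD_irrel : ∀ (xs : List Char) (x c d : Char),
    (x :: xs).getLastD c = (x :: xs).getLastD d := by
  intro xs
  induction xs with
  | nil => intro x c d; rfl
  | cons y ys ih => intro x c d; simp only [List.getLastD_cons]

lemma pv_getLastD_append : ∀ (l : List Char) (c d : Char) (l' : List Char), l' ≠ [] →
    (c :: (l ++ l')).getLastD d = l'.getLastD d := by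
  intro l
  induction l with
  | nil =>
    intro c d l' h
    cases l' with
    | nil => exact absurd rfl h
    | cons x xs => rw [List.getLastD_cons]; exact pv_getLastD_irrel xs x c d
  | cons y ys ih =>
    intro c d l' h
    rw [List.cons_append, List.getLastD_cons, ih y c l' h]
    cases l' with
    | nil => exact absurd rfl h
    | cons x xs => exact pv_getLastD_irrel xs x c d

-- the whole final run: loop ends, post-loop update = B's processing of the single last run
lemma pv_main_final (rest : List Char) (c : Char) (cm : PySem.Dict Char Int) (mx cur : Int)
    (hcur : 1 ≤ cur) (hinv : ∀ k, cm.getD k 0 ≤ mx) (hnd : cm.keys.Nodup)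
    (hall : ∀ x ∈ rest, x = c) :
    pvFinA (pvLoopA cm mx cur c rest) ((c :: rest).getLastD ' ')
      = pvLoopB (cm, mx) ((c, cur + ((rest.takeWhile (· == c)).length : Int)) ::
          pvRuns (rest.dropWhile (· == c))) := by
  have hdr : rest.dropWhile (· == c) = [] :=
    List.dropWhile_eq_nil_iff.mpr (fun x hx => by rw [hall x hx]; simp)
  have ht : rest.takeWhile (· == c) = rest :=
    List.takeWhile_eq_self_iff.mpr (fun x hx => by rw [hall x hx]; simp)
  rw [hdr, ht]
  have h1 : pvLoopA cm mx cur c rest = (cm, mx, cur + (rest.length : Int)) := by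
    conv_lhs => rw [← List.append_nil rest]
    rw [pv_loopA_run rest c hall [] cm mx cur]
    simp [pvLoopA]
  rw [h1, pv_getLastD_all rest c ' ' hall,
    show pvRuns [] = ([] : List (Char × Int)) from rfl, pvLoopB_cons, pvLoopB_nil]
  simp only [pvFinA]
  exact pv_step_eq cm mx _ c (by omega) hinv hnd

-- main invariant: A's loop + post-loop update = B's aggregation of the remaining runs,
-- with the current run already cur characters long
lemma pv_main : ∀ (n : Nat) (rest : List Char), rest.length ≤ n →
    ∀ (c : Char) (cm : PySem.Dict Char Int) (mx cur : Int), 1 ≤ cur →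
    (∀ k, cm.getD k 0 ≤ mx) → cm.keys.Nodup →
    pvFinA (pvLoopA cm mx cur c rest) ((c :: rest).getLastD ' ')
      = pvLoopB (cm, mx) ((c, cur + ((rest.takeWhile (· == c)).length : Int)) ::
          pvRuns (rest.dropWhile (· == c))) := by
  intro n
  induction n with
  | zero =>
    intro rest h c cm mx cur hcur hinv hnd
    have : rest = [] := List.eq_nil_of_length_eq_zero (Nat.le_zero.mp h)
    subst this
    exact pv_main_final [] c cm mx cur hcur hinv hnd (by simp)
  | succ n ih =>
    intro rest h c cm mx cur hcur hinv hnd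
    rcases hdr : rest.dropWhile (· == c) with _ | ⟨c', rest2⟩
    · -- last run of the string
      have hall : ∀ x ∈ rest, x = c :=
        fun x hx => eq_of_beq (List.dropWhile_eq_nil_iff.mp hdr x hx)
      have hfin := pv_main_final rest c cm mx cur hcur hinv hnd hall
      rw [hdr] at hfin
      exact hfin
    · -- a run ends inside the string
      have h0 : rest.dropWhile (· == c) ≠ [] := by rw [hdr]; simp
      have hc' : (c' == c) = false := by
        have h2 := List.head_dropWhile_not (· == c) h0
        simp only [hdr, List.head_cons] at h2
        exact h2
      have hall : ∀ x ∈ rest.takeWhile (· == c), x = c :=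
        fun x hx => eq_of_beq (List.mem_takeWhile_imp (p := fun y => y == c) hx)
      set t := rest.takeWhile (· == c) with htdef
      have hsplit : t ++ c' :: rest2 = rest := by
        rw [htdef, ← hdr]; exact List.takeWhile_append_dropWhile
      set L := cur + (t.length : Int) with hLdef
      have hL1 : 1 ≤ L := by
        have : (0 : Int) ≤ (t.length : Int) := Int.natCast_nonneg _
        omega
      have h1 : pvLoopA cm mx cur c rest
          = pvLoopA (cm.insert c (max (cm.getD c 0) L)) (max mx (max (cm.getD c 0) L)) 1 c'
              rest2 := by
        rw [← hsplit, pv_loopA_run t c hall (c' :: rest2) cm mx cur, ← hLdef]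
        simp [pvLoopA, hc']
      have hlast : (c :: rest).getLastD ' ' = (c' :: rest2).getLastD ' ' := by
        rw [← hsplit]; exact pv_getLastD_append t c ' ' (c' :: rest2) (by simp)
      rw [h1, hlast, pvLoopB_cons, ← pv_step_eq cm mx L c hL1 hinv hnd]
      have hlen : rest2.length ≤ n := by
        have : rest.length = t.length + rest2.length + 1 := by
          rw [← hsplit]; simp; omega
        omega
      have hinv' : ∀ k, (cm.insert c (max (cm.getD c 0) L)).getD k 0
          ≤ max mx (max (cm.getD c 0) L) := by
        intro k
        rw [PySem.Dict.getD_insert]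
        have hk := hinv k
        split_ifs <;> omega
      have hnd' : (cm.insert c (max (cm.getD c 0) L)).keys.Nodup :=
        PySem.Dict.nodup_keys_insert _ _ _ hnd
      have hrec := ih rest2 hlen c' _ _ 1 le_rfl hinv' hnd'
      rw [hrec, ← pvRuns_cons]

-- the pyRange index loop of port A is the structural loop pvLoopA
lemma pv_foldA (c : Char) (rest : List Char) :
    (PySem.List.pyRange 1 ((c :: rest).length) 1).foldl
      (fun (st : PySem.Dict Char Int × Int × Int) i =>
        if PySem.List.pyGetD (c :: rest) i ' ' == PySem.List.pyGetD (c :: rest) (i - 1) ' ' then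
          (st.1, st.2.1, st.2.2 + 1)
        else
          (st.1.insert (PySem.List.pyGetD (c :: rest) (i - 1) ' ')
             (max (st.1.getD (PySem.List.pyGetD (c :: rest) (i - 1) ' ') 0) st.2.2),
           max st.2.1 (max (st.1.getD (PySem.List.pyGetD (c :: rest) (i - 1) ' ') 0) st.2.2), 1))
      (PySem.Dict.empty, 0, 1)
    = pvLoopA PySem.Dict.empty 0 1 c rest := by
  have h : (fun (st : PySem.Dict Char Int × Int × Int) (i : Int) =>
      if PySem.List.pyGetD (c :: rest) i ' ' == PySem.List.pyGetD (c :: rest) (i - 1) ' ' then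
        (st.1, st.2.1, st.2.2 + 1)
      else
        (st.1.insert (PySem.List.pyGetD (c :: rest) (i - 1) ' ')
           (max (st.1.getD (PySem.List.pyGetD (c :: rest) (i - 1) ' ') 0) st.2.2),
         max st.2.1 (max (st.1.getD (PySem.List.pyGetD (c :: rest) (i - 1) ' ') 0) st.2.2), 1))
      = fun st i => pvStep st
          (PySem.List.pyGetD (c :: rest) i ' ', PySem.List.pyGetD (c :: rest) (i - 1) ' ') := rfl
  have h2 : ((PySem.List.pyRange 1 ((c :: rest).length) 1).map
      (fun i => (PySem.List.pyGetD (c :: rest) i ' ',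
        PySem.List.pyGetD (c :: rest) (i - 1) ' '))).foldl pvStep (PySem.Dict.empty, 0, 1)
      = (PySem.List.pyRange 1 ((c :: rest).length) 1).foldl
          (fun st i => pvStep st (PySem.List.pyGetD (c :: rest) i ' ',
            PySem.List.pyGetD (c :: rest) (i - 1) ' ')) (PySem.Dict.empty, 0, 1) := by
    simp only [List.foldl_map]
  rw [h, ← h2, pv_zip_eq (c :: rest), List.tail_cons]
  exact pv_fold_zip rest c _ _ _

-- ===== VERDICT (by name: the statement is the Claim_ definition above) =====
theorem highest_Frequency_spec : Claim_equal_highest_Frequency := by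
  intro s _ hp
  unfold Spec_highest_Frequency
  have hnil : s.toList ≠ [] := fun h => hp (String.toList_eq_nil_iff.mp h)
  obtain ⟨c, rest, hcs⟩ := List.exists_cons_of_ne_nil hnil
  have hlast : PySem.List.pyGetD (c :: rest) (-1) ' ' = (c :: rest).getLastD ' ' := by
    rw [PySem.List.pyGetD_neg_one (c :: rest) ' ' (by simp), List.getLast_eq_getLastD,
      List.getLastD_cons]
  have hmain := pv_main rest.length rest le_rfl c PySem.Dict.empty 0 1 le_rfl
    (fun k => by simp [PySem.Dict.getD_empty]) PySem.Dict.nodup_keys_empty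
  rw [← pvRuns_cons] at hmain
  have hA : highest_Frequency s
      = ((pvFinA (pvLoopA PySem.Dict.empty 0 1 c rest) ((c :: rest).getLastD ' ')).2,
         (pvFinA (pvLoopA PySem.Dict.empty 0 1 c rest) ((c :: rest).getLastD ' ')).1.items.filterMap
           (fun p => if p.2 = (pvFinA (pvLoopA PySem.Dict.empty 0 1 c rest)
               ((c :: rest).getLastD ' ')).2 then some (String.singleton p.1) else none)) := by
    simp only [highest_Frequency, hcs]
    rw [pv_foldA c rest, hlast]
    simp [pvFinA]
  have hB : highest_Frequency_alt s
      = ((pvLoopB (PySem.Dict.empty, 0) (pvRuns (c :: rest))).2,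
         (pvLoopB (PySem.Dict.empty, 0) (pvRuns (c :: rest))).1.items.filterMap
           (fun p => if p.2 = (pvLoopB (PySem.Dict.empty, 0) (pvRuns (c :: rest))).2
             then some (String.singleton p.1) else none)) := by
    simp only [highest_Frequency_alt, hcs]
    rfl
  rw [hA, hB, hmain]
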